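-- pv_equiv track=rewrite | github.com/BardSec/pcap-bloodhound | app/analyzers/dga_detection.py | _has_dictionary_words
-- ===== SOURCE A (Python) =====
-- def _has_dictionary_words(s):
--     """Simple heuristic — check if string contains common English patterns."""
--     common = ["the", "and", "for", "com", "net", "org", "web", "mail", "www",
--               "api", "app", "dev", "cdn", "img", "login", "auth", "cloud"]
--     s_lower = s.lower()
--     for word in common:
--         if word in s_lower:
--             return True
--     return False
-- ===== SOURCE B (Python) =====
-- def _has_dictionary_words(s):
--     """Single sliding-window scan: per position, test the 3/4/5-char window
--     against hash sets grouped by word length, instead of 17 separate substring searches."""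
--     words3 = frozenset(["the", "and", "for", "com", "net", "org", "web",
--                         "www", "api", "app", "dev", "cdn", "img"])
--     words4 = frozenset(["mail", "auth"])
--     words5 = frozenset(["login", "cloud"])
--     t = s.lower()
--     return any(t[i:i+3] in words3 or t[i:i+4] in words4 or t[i:i+5] in words5
--                for i in range(len(t)))
-- ===== Notes on version B (the rewrite author's own statement) =====
-- stated objective: alternative
-- what changed: Replaces A's 17 separate whole-string substring searches (one per dictionary word) by a single left-to-right sliding-window scan that tests each position's 3/4/5-character window for membership in length-grouped hash sets.
import Mathlib
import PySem

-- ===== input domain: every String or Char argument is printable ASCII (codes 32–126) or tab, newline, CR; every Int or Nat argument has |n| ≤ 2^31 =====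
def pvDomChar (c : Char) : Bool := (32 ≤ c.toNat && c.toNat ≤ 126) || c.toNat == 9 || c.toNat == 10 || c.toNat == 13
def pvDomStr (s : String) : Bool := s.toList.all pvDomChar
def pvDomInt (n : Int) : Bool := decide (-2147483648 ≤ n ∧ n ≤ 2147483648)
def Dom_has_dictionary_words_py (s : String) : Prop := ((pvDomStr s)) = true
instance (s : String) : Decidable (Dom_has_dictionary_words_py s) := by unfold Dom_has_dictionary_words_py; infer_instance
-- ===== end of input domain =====

-- B replaces A's 17 separate substring searches by one sliding-window scan testing each
-- 3/4/5-char window against length-grouped word sets (alternative decomposition, same result).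

-- ===== PORT A =====
-- the 'for word in common: if word in s_lower: return True' loop, as structural recursion
def hdwLoopA (sl : String) : List String → Bool
  | [] => false
  | w :: rest => if PySem.Str.isIn w sl then true else hdwLoopA sl rest

def has_dictionary_words_py (s : String) : Bool :=
  let common := ["the", "and", "for", "com", "net", "org", "web", "mail", "www",
                 "api", "app", "dev", "cdn", "img", "login", "auth", "cloud"]
  let s_lower := PySem.Str.lower s
  hdwLoopA s_lower common

-- ===== PORT B =====
def hdwW3 : List (List Char) :=
  ["the".toList, "and".toList, "for".toList, "com".toList, "net".toList, "org".toList,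
   "web".toList, "www".toList, "api".toList, "app".toList, "dev".toList, "cdn".toList,
   "img".toList]
def hdwW4 : List (List Char) := ["mail".toList, "auth".toList]
def hdwW5 : List (List Char) := ["login".toList, "cloud".toList]

def has_dictionary_words_py_alt (s : String) : Bool :=
  let t := (PySem.Str.lower s).toList
  (List.range t.length).any fun i =>
    hdwW3.contains (PySem.List.slice t (some (i : Int)) (some ((i : Int) + 3))) ||
    hdwW4.contains (PySem.List.slice t (some (i : Int)) (some ((i : Int) + 4))) ||
    hdwW5.contains (PySem.List.slice t (some (i : Int)) (some ((i : Int) + 5)))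

-- ===== PRECONDITION & SPEC =====
def Spec_has_dictionary_words_py (s : String) (out : Bool) : Prop := out = has_dictionary_words_py_alt s
instance (s : String) (out : Bool) : Decidable (Spec_has_dictionary_words_py s out) := by unfold Spec_has_dictionary_words_py; infer_instance

-- ===== CLAIM (what is proved, stated in full; the proofs are below) =====
def Claim_equal_has_dictionary_words_py : Prop := ∀ (s : String), Dom_has_dictionary_words_py s → Spec_has_dictionary_words_py s (has_dictionary_words_py s)

-- ===== LEMMAS AND PROOFS =====

-- A's early-return loop is 'any word is a substring'
lemma hdwLoopA_eq_any (sl : String) (ws : List String) :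
    hdwLoopA sl ws = ws.any (fun w => PySem.Str.isIn w sl) := by
  induction ws with
  | nil => rfl
  | cons w rest ih =>
      simp only [hdwLoopA, List.any_cons, ih]
      cases PySem.Str.isIn w sl <;> simp

-- scanning all windows of length w.length for equality with w IS substring search for w
lemma hdw_window_eq_isIn (t w : List Char) (k : Int) (hk : k = (w.length : Int)) (hw : w ≠ []) :
    ((List.range t.length).any fun i =>
        PySem.List.slice t (some (i : Int)) (some ((i : Int) + k)) == w)
      = PySem.Chars.isIn w t := by
  subst hk
  rw [Bool.eq_iff_iff]
  simp only [List.any_eq_true, List.mem_range, beq_iff_eq]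
  rw [← PySem.Chars.exists_prefix_drop_iff_isIn]
  constructor
  · rintro ⟨i, _, hslice⟩
    refine ⟨i, ?_⟩
    rw [PySem.List.slice_natCast_add] at hslice
    rw [← hslice]
    exact List.take_prefix _ _
  · rintro ⟨j, hj⟩
    have hjlen : j < t.length := by
      by_contra h
      push Not at h
      rw [List.drop_eq_nil_of_le h] at hj
      exact hw (List.prefix_nil.mp hj)
    refine ⟨j, hjlen, ?_⟩
    rw [PySem.List.slice_natCast_add, ← List.prefix_iff_eq_take.mp hj]

-- any distributes over a pointwise disjunction
lemma hdw_any_or {α : Type} (l : List α) (p q : α → Bool) :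
    (l.any fun x => p x || q x) = (l.any p || l.any q) := by
  rw [Bool.eq_iff_iff]
  simp only [List.any_eq_true, Bool.or_eq_true]
  constructor
  · rintro ⟨x, hx, h | h⟩
    exacts [Or.inl ⟨x, hx, h⟩, Or.inr ⟨x, hx, h⟩]
  · rintro (⟨x, hx, h⟩ | ⟨x, hx, h⟩)
    exacts [⟨x, hx, Or.inl h⟩, ⟨x, hx, Or.inr h⟩]

-- ===== VERDICT (by name: the statement is the Claim_ definition above) =====
set_option maxHeartbeats 2000000 in
theorem has_dictionary_words_py_spec : Claim_equal_has_dictionary_words_py := by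
  intro s _
  unfold Spec_has_dictionary_words_py has_dictionary_words_py has_dictionary_words_py_alt
  simp only [hdwLoopA_eq_any, hdwW3, hdwW4, hdwW5, List.contains_cons, List.contains_nil,
    Bool.or_false, List.any_cons, List.any_nil, hdw_any_or]
  rw [hdw_window_eq_isIn _ "the".toList 3 rfl (by decide)]
  rw [hdw_window_eq_isIn _ "and".toList 3 rfl (by decide)]
  rw [hdw_window_eq_isIn _ "for".toList 3 rfl (by decide)]
  rw [hdw_window_eq_isIn _ "com".toList 3 rfl (by decide)]
  rw [hdw_window_eq_isIn _ "net".toList 3 rfl (by decide)]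
  rw [hdw_window_eq_isIn _ "org".toList 3 rfl (by decide)]
  rw [hdw_window_eq_isIn _ "web".toList 3 rfl (by decide)]
  rw [hdw_window_eq_isIn _ "www".toList 3 rfl (by decide)]
  rw [hdw_window_eq_isIn _ "api".toList 3 rfl (by decide)]
  rw [hdw_window_eq_isIn _ "app".toList 3 rfl (by decide)]
  rw [hdw_window_eq_isIn _ "dev".toList 3 rfl (by decide)]
  rw [hdw_window_eq_isIn _ "cdn".toList 3 rfl (by decide)]
  rw [hdw_window_eq_isIn _ "img".toList 3 rfl (by decide)]
  rw [hdw_window_eq_isIn _ "mail".toList 4 rfl (by decide)]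
  rw [hdw_window_eq_isIn _ "auth".toList 4 rfl (by decide)]
  rw [hdw_window_eq_isIn _ "login".toList 5 rfl (by decide)]
  rw [hdw_window_eq_isIn _ "cloud".toList 5 rfl (by decide)]
  simp only [PySem.Str.isIn_eq]
  ac_rfl
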